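-- pv_equiv track=rewrite | github.com/51nk0r5w1m/docs | generate_assetdb_docs.py | strip_h1
-- ===== SOURCE A (Python) =====
-- def strip_h1(text):
--     """Remove the H1 heading from a piece of content (for embedding as subsection)."""
--     lines = text.split('\n')
--     result = []
--     skipped = False
--     for line in lines:
--         if not skipped and line.startswith('# '):
--             skipped = True
--             continue
--         result.append(line)
--     return '\n'.join(result).lstrip('\n')
-- ===== SOURCE B (Python) =====
-- def strip_h1(text):
--     """Remove the H1 heading from a piece of content (for embedding as subsection)."""
--     # Scan the raw string by line-start offsets instead of splitting into lines:
--     # delete the first '# ' line together with its trailing '\n' (or, if it is the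
--     # final line, the '\n' before it), then strip leading newlines.
--     pos = 0  # start index of the current line
--     while True:
--         if text.startswith('# ', pos):
--             end = text.find('\n', pos)
--             if end == -1:
--                 res = text[:pos - 1] if pos else ''
--             else:
--                 res = text[:pos] + text[end + 1:]
--             break
--         nxt = text.find('\n', pos)
--         if nxt == -1:
--             res = text
--             break
--         pos = nxt + 1
--     return res.lstrip('\n')
-- ===== Notes on version B (the rewrite author's own statement) =====
-- stated objective: alternative
-- what changed: Replaces A's split-into-lines/flag-filter/join pipeline with an index-based scan of the raw string: it walks line-start offsets with str.find and, at the first H1 heading line, splices that line (and its newline) out of the original string, never building a line list.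
import Mathlib
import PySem

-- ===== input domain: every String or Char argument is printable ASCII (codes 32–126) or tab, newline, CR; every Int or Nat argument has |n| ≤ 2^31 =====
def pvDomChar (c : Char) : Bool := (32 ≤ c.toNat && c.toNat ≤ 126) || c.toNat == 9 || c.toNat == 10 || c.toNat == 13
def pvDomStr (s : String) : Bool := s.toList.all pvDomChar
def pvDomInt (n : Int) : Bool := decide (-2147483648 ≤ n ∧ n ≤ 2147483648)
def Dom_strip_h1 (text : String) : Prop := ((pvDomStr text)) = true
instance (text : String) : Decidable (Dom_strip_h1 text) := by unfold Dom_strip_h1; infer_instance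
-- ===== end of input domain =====

-- B removes the first H1 heading line by scanning the raw string over line-start offsets
-- (find/splice on character indices), never splitting into a line list (alternative algorithm, same cost).

-- ===== PORT A =====
-- loop body of A: skip the first line starting with '# ', append every other line
def stripH1Step (st : List (List Char) × Bool) (line : List Char) : List (List Char) × Bool :=
  if !st.2 && PySem.Chars.startswith line ['#', ' '] then (st.1, true)
  else (st.1 ++ [line], st.2)

def strip_h1 (text : String) : String :=
  let lines := PySem.Chars.splitOn text.toList ['\n']
  let st := lines.foldl stripH1Step ([], false)
  -- .lstrip('\n') ported by hand as dropWhile (· == '\n'): exact (drops exactly the leading '\n's)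
  String.ofList ((PySem.Chars.join ['\n'] st.1).dropWhile (· == '\n'))

-- ===== PORT B =====
-- B's while loop over the line-start offset pos, as recursion on the suffix length.
-- text.find('\n', pos) is ported relative to the suffix: it returns pos + find(text[pos:]) or -1
-- (exact for 0 ≤ pos ≤ len: PySem.Chars.findFrom_natCast); text.startswith('# ', pos) is
-- startswith on the suffix, and the slices text[:pos], text[:pos-1], text[end+1:] are
-- take/drop with in-range non-negative indices (exact).
def altScan (cs : List Char) (pos : Nat) : List Char :=
  if PySem.Chars.startswith (cs.drop pos) ['#', ' '] then
    let e := PySem.Chars.find (cs.drop pos) ['\n']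
    if e = -1 then (if pos = 0 then [] else cs.take (pos - 1))
    else cs.take pos ++ cs.drop (pos + e.toNat + 1)
  else
    let nxt := PySem.Chars.find (cs.drop pos) ['\n']
    if _h : nxt = -1 then cs
    else altScan cs (pos + nxt.toNat + 1)
termination_by cs.length - pos
decreasing_by
  have hinf : ['\n'] <:+: cs.drop pos := (PySem.Chars.find_ne_neg_one_iff _ _).mp _h
  have hne : cs.drop pos ≠ [] := by
    intro hnil; rw [hnil] at hinf; simp at hinf
  have : pos < cs.length := by
    by_contra hge
    exact hne (List.drop_eq_nil_of_le (by omega))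
  omega

def strip_h1_alt (text : String) : String :=
  -- res.lstrip('\n') ported by hand as dropWhile (· == '\n'): exact (drops exactly the leading '\n's)
  String.ofList ((altScan text.toList 0).dropWhile (· == '\n'))

-- ===== PRECONDITION & SPEC =====
def Spec_strip_h1 (text : String) (out : String) : Prop := out = strip_h1_alt text
instance (text : String) (out : String) : Decidable (Spec_strip_h1 text out) := by unfold Spec_strip_h1; infer_instance

-- ===== CLAIM (what is proved, stated in full; the proofs are below) =====
def Claim_equal_strip_h1 : Prop := ∀ (text : String), Dom_strip_h1 text → Spec_strip_h1 text (strip_h1 text)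

-- ===== LEMMAS AND PROOFS =====

-- proof-side reference splitter: structural version of text.split('\n')
def mySplit : List Char → List (List Char)
  | [] => [[]]
  | c :: r => if c = '\n' then [] :: mySplit r else (mySplit r).modifyHead (c :: ·)

lemma mySplit_ne_nil (r : List Char) : mySplit r ≠ [] := by
  induction r with
  | nil => simp [mySplit]
  | cons c r ih =>
    by_cases h : c = '\n'
    · simp [mySplit, h]
    · simp [mySplit, h]; exact ih

lemma splitOn_go_eq (l : List Char) : ∀ (fuel : Nat) (cur : List Char) (acc : List (List Char)),
    l.length ≤ fuel →
    PySem.Chars.splitOn.go ['\n'] fuel l cur acc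
      = acc.reverse ++ (mySplit l).modifyHead (cur.reverse ++ ·) := by
  induction l with
  | nil =>
    intro fuel cur acc _
    cases fuel <;> simp [PySem.Chars.splitOn.go, mySplit]
  | cons c r ih =>
    intro fuel cur acc hf
    cases fuel with
    | zero => simp at hf
    | succ f =>
      by_cases h : c = '\n'
      · subst h
        rw [show PySem.Chars.splitOn.go ['\n'] (f+1) ('\n' :: r) cur acc
              = PySem.Chars.splitOn.go ['\n'] f r [] (cur.reverse :: acc) by
            simp [PySem.Chars.splitOn.go, List.isPrefixOf]]
        rw [ih f [] (cur.reverse :: acc) (by simpa using hf)]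
        cases hm : mySplit r <;> simp [mySplit, hm]
      · rw [show PySem.Chars.splitOn.go ['\n'] (f+1) (c :: r) cur acc
              = PySem.Chars.splitOn.go ['\n'] f r (c :: cur) acc by
            simp [PySem.Chars.splitOn.go, List.isPrefixOf]
            intro hc; exact absurd hc.symm h]
        rw [ih f (c :: cur) acc (by simpa using hf)]
        have hne := mySplit_ne_nil r
        cases hm : mySplit r with
        | nil => exact absurd hm hne
        | cons a t => simp [mySplit, h, hm]

lemma splitOn_eq_mySplit (r : List Char) : PySem.Chars.splitOn r ['\n'] = mySplit r := by
  rw [PySem.Chars.splitOn, splitOn_go_eq r (r.length + 1) [] [] (by omega)]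
  have hne := mySplit_ne_nil r
  cases hm : mySplit r with
  | nil => exact absurd hm hne
  | cons a t => simp

lemma mySplit_of_not_mem (r : List Char) (h : '\n' ∉ r) : mySplit r = [r] := by
  induction r with
  | nil => simp [mySplit]
  | cons c t ih =>
    simp only [List.mem_cons, not_or] at h
    simp [mySplit, Ne.symm h.1, ih h.2]

lemma mySplit_append (l r : List Char) (h : '\n' ∉ l) :
    mySplit (l ++ '\n' :: r) = l :: mySplit r := by
  induction l with
  | nil => simp [mySplit]
  | cons c t ih =>
    simp only [List.mem_cons, not_or] at h
    simp [mySplit, Ne.symm h.1, ih h.2]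

lemma join_cons_ne_nil (a : List Char) (M : List (List Char)) (h : M ≠ []) :
    PySem.Chars.join ['\n'] (a :: M) = a ++ '\n' :: PySem.Chars.join ['\n'] M := by
  cases M with
  | nil => exact absurd rfl h
  | cons b t => rw [PySem.Chars.join_cons_cons]; simp

lemma join_mySplit (r : List Char) : PySem.Chars.join ['\n'] (mySplit r) = r := by
  induction r with
  | nil => simp [mySplit, PySem.Chars.join_singleton]
  | cons c t ih =>
    by_cases h : c = '\n'
    · subst h
      rw [mySplit, if_pos rfl, join_cons_ne_nil [] _ (mySplit_ne_nil t)]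
      simp [ih]
    · rw [mySplit, if_neg h]
      have hne := mySplit_ne_nil t
      cases hm : mySplit t with
      | nil => exact absurd hm hne
      | cons a m =>
        rw [hm] at ih
        cases m with
        | nil => simpa [PySem.Chars.join_singleton] using ih
        | cons b m' =>
          rw [List.modifyHead_cons, PySem.Chars.join_cons_cons] at *
          simp_all

-- A's predicate on a truncated line implies it on the line
lemma startswith_take (l : List Char) (n : Nat)
    (h : PySem.Chars.startswith (l.take n) ['#', ' '] = true) :
    PySem.Chars.startswith l ['#', ' '] = true := by
  rw [PySem.Chars.startswith_iff] at h ⊢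
  exact h.trans (List.take_prefix n l)

-- characterization of find for the single character '\n'
lemma find_newline_spec (r : List Char) (h : PySem.Chars.find r ['\n'] ≠ -1) :
    (PySem.Chars.find r ['\n']).toNat < r.length ∧
    r.drop (PySem.Chars.find r ['\n']).toNat
      = '\n' :: r.drop ((PySem.Chars.find r ['\n']).toNat + 1) ∧
    '\n' ∉ r.take (PySem.Chars.find r ['\n']).toNat := by
  have h0 : 0 ≤ PySem.Chars.find r ['\n'] := by
    have := PySem.Chars.neg_one_le_find r ['\n']
    omega
  obtain ⟨hpre, hmin⟩ := PySem.Chars.find_spec h0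
  set e := (PySem.Chars.find r ['\n']).toNat with he
  obtain ⟨t, ht⟩ := hpre
  have hdrop : r.drop e = '\n' :: t := by simpa using ht.symm
  have hlen : e < r.length := by
    by_contra hge
    have : r.drop e = [] := List.drop_eq_nil_of_le (by omega)
    rw [hdrop] at this; simp at this
  have ht1 : r.drop (e + 1) = t := by
    have h2 := congrArg List.tail hdrop
    simpa [List.tail_drop] using h2
  refine ⟨hlen, by rw [hdrop, ht1], ?_⟩
  intro hm
  obtain ⟨i, hi, hgi⟩ := List.mem_iff_getElem.mp hm
  have hilt : i < e := by
    simp [List.length_take] at hi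
    omega
  refine hmin i hilt ⟨r.drop (i + 1), ?_⟩
  have : r.drop i = r[i] :: r.drop (i + 1) := List.drop_eq_getElem_cons (by omega)
  rw [List.getElem_take] at hgi
  rw [this, hgi]
  simp

-- the result formula of B's scan: splice of the reference split, shifted by the consumed prefix
def spliceRhs (cs : List Char) (pos : Nat) : List Char :=
  match (mySplit (cs.drop pos)).findIdx? (fun l => PySem.Chars.startswith l ['#', ' ']) with
  | none => cs
  | some i =>
      if (mySplit (cs.drop pos)).length = 1 then (cs.take pos).dropLast
      else cs.take pos ++ PySem.Chars.join ['\n']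
        ((mySplit (cs.drop pos)).take i ++ (mySplit (cs.drop pos)).drop (i + 1))

lemma find_neg_not_mem (r : List Char) (h : PySem.Chars.find r ['\n'] = -1) : '\n' ∉ r := by
  intro hm
  obtain ⟨s, t, rfl⟩ := List.append_of_mem hm
  exact (PySem.Chars.find_ne_neg_one_iff _ _).mpr ⟨s, t, by simp⟩ h

lemma dropLast_take (cs : List Char) (pos : Nat) (h : pos ≤ cs.length) :
    (cs.take pos).dropLast = cs.take (pos - 1) := by
  rw [List.dropLast_eq_take, List.take_take, List.length_take]
  congr 1
  omega

lemma altScan_eq (cs : List Char) (pos : Nat) :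
    pos ≤ cs.length → altScan cs pos = spliceRhs cs pos := by
  induction pos using altScan.induct cs with
  | case1 hp e he =>
    intro _
    have he' : PySem.Chars.find (cs.drop 0) ['\n'] = -1 := he
    have hms : mySplit (cs.drop 0) = [cs.drop 0] :=
      mySplit_of_not_mem _ (find_neg_not_mem _ he')
    unfold spliceRhs
    rw [altScan]
    simp only [List.drop_zero] at hp he' hms
    simp [hp, he', hms, List.findIdx?_cons]
  | case2 pos hp e he hpos0 =>
    intro hpos
    have he' : PySem.Chars.find (cs.drop pos) ['\n'] = -1 := he
    have hms : mySplit (cs.drop pos) = [cs.drop pos] :=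
      mySplit_of_not_mem _ (find_neg_not_mem _ he')
    unfold spliceRhs
    rw [altScan]
    simp [hp, he', hms, hpos0, dropLast_take cs pos hpos, List.findIdx?_cons]
  | case3 pos hp e he =>
    intro hpos
    have he' : PySem.Chars.find (cs.drop pos) ['\n'] ≠ -1 := he
    obtain ⟨hlen, hdrop, hnm⟩ := find_newline_spec (cs.drop pos) he'
    have hr := List.take_append_drop (PySem.Chars.find (cs.drop pos) ['\n']).toNat (cs.drop pos)
    rw [hdrop] at hr
    have hms : mySplit (cs.drop pos)
        = (cs.drop pos).take (PySem.Chars.find (cs.drop pos) ['\n']).toNat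
          :: mySplit ((cs.drop pos).drop ((PySem.Chars.find (cs.drop pos) ['\n']).toNat + 1)) := by
      conv_lhs => rw [← hr]
      exact mySplit_append _ _ hnm
    obtain ⟨t2, ht2⟩ := (PySem.Chars.startswith_iff _ _).mp hp
    have hgen : (cs.drop pos)[(PySem.Chars.find (cs.drop pos) ['\n']).toNat]? = some '\n' := by
      rw [← List.head?_drop, hdrop]; rfl
    have h0 : (cs.drop pos)[0]? = some '#' := by rw [← ht2]; rfl
    have h1 : (cs.drop pos)[1]? = some ' ' := by rw [← ht2]; rfl
    have hen2 : 2 ≤ (PySem.Chars.find (cs.drop pos) ['\n']).toNat := by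
      rcases Nat.lt_or_ge (PySem.Chars.find (cs.drop pos) ['\n']).toNat 2 with hlt | hge
      · interval_cases h : (PySem.Chars.find (cs.drop pos) ['\n']).toNat <;> simp_all
      · exact hge
    have hpt : PySem.Chars.startswith
        ((cs.drop pos).take (PySem.Chars.find (cs.drop pos) ['\n']).toNat) ['#', ' '] = true := by
      rw [PySem.Chars.startswith_iff]
      have h2 : ['#', ' ']
          = ((cs.drop pos).take (PySem.Chars.find (cs.drop pos) ['\n']).toNat).take 2 := by
        rw [List.take_take, Nat.min_eq_left hen2, ← ht2]
        simp
      rw [h2]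
      exact List.take_prefix _ _
    unfold spliceRhs
    rw [altScan]
    rw [hms]
    simp only [hp, if_true, he', if_false, List.findIdx?_cons, hpt, List.length_cons,
      List.take_zero, List.drop_succ_cons, List.drop_zero, List.nil_append]
    have hne1 : (mySplit ((cs.drop pos).drop ((PySem.Chars.find (cs.drop pos) ['\n']).toNat + 1))).length + 1 ≠ 1 := by
      have := mySplit_ne_nil ((cs.drop pos).drop ((PySem.Chars.find (cs.drop pos) ['\n']).toNat + 1))
      cases hm : mySplit ((cs.drop pos).drop ((PySem.Chars.find (cs.drop pos) ['\n']).toNat + 1)) with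
      | nil => exact absurd hm this
      | cons a t => simp
    rw [if_neg hne1, join_mySplit, List.drop_drop, Nat.add_assoc]
  | case4 pos hp e hn =>
    intro _
    have hn' : PySem.Chars.find (cs.drop pos) ['\n'] = -1 := hn
    have hms : mySplit (cs.drop pos) = [cs.drop pos] :=
      mySplit_of_not_mem _ (find_neg_not_mem _ hn')
    unfold spliceRhs
    rw [altScan]
    simp [hp, hn', hms, List.findIdx?_cons]
  | case5 pos hp e hn ih =>
    intro hpos
    have hn' : PySem.Chars.find (cs.drop pos) ['\n'] ≠ -1 := hn
    obtain ⟨hlen, hdrop, hnm⟩ := find_newline_spec (cs.drop pos) hn'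
    have hlen' : (PySem.Chars.find (cs.drop pos) ['\n']).toNat < cs.length - pos := by
      simpa [List.length_drop] using hlen
    have hpos' : pos + (PySem.Chars.find (cs.drop pos) ['\n']).toNat + 1 ≤ cs.length := by omega
    rw [altScan, if_neg hp, dif_neg hn', ih hpos']
    -- both sides are spliceRhs; relate them through the cons structure of mySplit
    have hr := List.take_append_drop (PySem.Chars.find (cs.drop pos) ['\n']).toNat (cs.drop pos)
    rw [hdrop] at hr
    have hms : mySplit (cs.drop pos)
        = (cs.drop pos).take (PySem.Chars.find (cs.drop pos) ['\n']).toNat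
          :: mySplit ((cs.drop pos).drop ((PySem.Chars.find (cs.drop pos) ['\n']).toNat + 1)) := by
      conv_lhs => rw [← hr]
      exact mySplit_append _ _ hnm
    have hdrop' : cs.drop (pos + (PySem.Chars.find (cs.drop pos) ['\n']).toNat + 1)
        = (cs.drop pos).drop ((PySem.Chars.find (cs.drop pos) ['\n']).toNat + 1) := by
      rw [List.drop_drop, Nat.add_assoc]
    have hpl0 : PySem.Chars.startswith
        ((cs.drop pos).take (PySem.Chars.find (cs.drop pos) ['\n']).toNat) ['#', ' '] = false := by
      by_contra hc
      exact hp (startswith_take _ _ (by simpa using hc))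
    have hgnn : (cs.drop pos)[(PySem.Chars.find (cs.drop pos) ['\n']).toNat]? = some '\n' := by
      rw [← List.head?_drop, hdrop]; rfl
    have htake' : cs.take (pos + (PySem.Chars.find (cs.drop pos) ['\n']).toNat + 1)
        = cs.take pos ++ (cs.drop pos).take (PySem.Chars.find (cs.drop pos) ['\n']).toNat ++ ['\n'] := by
      rw [show pos + (PySem.Chars.find (cs.drop pos) ['\n']).toNat + 1
            = pos + ((PySem.Chars.find (cs.drop pos) ['\n']).toNat + 1) by omega,
          List.take_add, List.take_add_one, hgnn]
      simp
    unfold spliceRhs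
    rw [hms, hdrop']
    rw [List.findIdx?_cons, hpl0]
    simp only [Bool.false_eq_true, if_false]
    cases hM : (mySplit ((cs.drop pos).drop ((PySem.Chars.find (cs.drop pos) ['\n']).toNat + 1))).findIdx?
        (fun l => PySem.Chars.startswith l ['#', ' ']) with
    | none => simp
    | some j =>
      have hj : j < (mySplit ((cs.drop pos).drop ((PySem.Chars.find (cs.drop pos) ['\n']).toNat + 1))).length :=
        (List.findIdx?_eq_some_iff_findIdx_eq.mp hM).1
      have hMne := mySplit_ne_nil ((cs.drop pos).drop ((PySem.Chars.find (cs.drop pos) ['\n']).toNat + 1))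
      simp only [Option.map_some]
      have hL1 : (mySplit ((cs.drop pos).drop ((PySem.Chars.find (cs.drop pos) ['\n']).toNat + 1))).length + 1 ≠ 1 := by
        omega
      rw [List.length_cons, if_neg hL1]
      by_cases hM1 : (mySplit ((cs.drop pos).drop ((PySem.Chars.find (cs.drop pos) ['\n']).toNat + 1))).length = 1
      · have hj0 : j = 0 := by omega
        subst hj0
        rw [if_pos hM1, htake', List.dropLast_concat]
        have hdropM : (mySplit ((cs.drop pos).drop ((PySem.Chars.find (cs.drop pos) ['\n']).toNat + 1))).drop 1 = [] :=
          List.drop_eq_nil_of_le (by omega)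
        simp only [Nat.zero_add, List.take_succ_cons, List.take_zero, List.drop_succ_cons, hdropM]
        simp [PySem.Chars.join_singleton]
      · rw [if_neg hM1, htake']
        have hspne : (mySplit ((cs.drop pos).drop ((PySem.Chars.find (cs.drop pos) ['\n']).toNat + 1))).take j
            ++ (mySplit ((cs.drop pos).drop ((PySem.Chars.find (cs.drop pos) ['\n']).toNat + 1))).drop (j + 1) ≠ [] := by
          intro hnil
          have hlen0 : 0 < (mySplit ((cs.drop pos).drop ((PySem.Chars.find (cs.drop pos) ['\n']).toNat + 1))).length :=
            List.length_pos_of_ne_nil hMne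
          have h2 := congrArg List.length hnil
          rw [List.length_append, List.length_take, List.length_drop,
            Nat.min_eq_left (le_of_lt hj), List.length_nil] at h2
          omega
        rw [List.take_succ_cons, List.drop_succ_cons, List.cons_append,
          join_cons_ne_nil _ _ hspne]
        simp

-- once the flag is set, A's loop appends every remaining line unchanged
lemma stripH1_foldl_true (lines : List (List Char)) (acc : List (List Char)) :
    lines.foldl stripH1Step (acc, true) = (acc ++ lines, true) := by
  induction lines generalizing acc with
  | nil => simp
  | cons l ls ih => simp [stripH1Step, ih]

-- with the flag unset, A's loop removes exactly the first matching line
lemma stripH1_foldl_false (lines : List (List Char)) (acc : List (List Char)) :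
    (lines.foldl stripH1Step (acc, false)).1 =
      acc ++ (match lines.findIdx? (fun l => PySem.Chars.startswith l ['#', ' ']) with
              | some i => lines.take i ++ lines.drop (i + 1)
              | none => lines) := by
  induction lines generalizing acc with
  | nil => simp
  | cons l ls ih =>
    by_cases h : PySem.Chars.startswith l ['#', ' ']
    · simp [List.foldl_cons, stripH1Step, h, stripH1_foldl_true, List.findIdx?_cons]
    · simp only [List.foldl_cons, stripH1Step, h, Bool.not_false, Bool.and_false, if_neg,
        Bool.false_eq_true, not_false_eq_true, List.findIdx?_cons]
      rw [ih]
      cases hf : ls.findIdx? (fun l => PySem.Chars.startswith l ['#', ' ']) with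
      | none => simp
      | some i => simp [List.take_succ_cons, List.drop_succ_cons]

-- ===== VERDICT (by name: the statement is the Claim_ definition above) =====
theorem strip_h1_spec : Claim_equal_strip_h1 := by
  intro text _
  unfold Spec_strip_h1 strip_h1 strip_h1_alt
  dsimp only
  rw [stripH1_foldl_false, altScan_eq text.toList 0 (by omega)]
  unfold spliceRhs
  simp only [List.nil_append, List.drop_zero, splitOn_eq_mySplit]
  cases hf : (mySplit text.toList).findIdx? (fun l => PySem.Chars.startswith l ['#', ' ']) with
  | none => rw [join_mySplit]
  | some i =>
    dsimp only
    by_cases h1 : (mySplit text.toList).length = 1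
    · have hi : i = 0 := by
        have := List.findIdx?_eq_some_iff_findIdx_eq.mp hf
        omega
      subst hi
      have : (mySplit text.toList).take 0 ++ (mySplit text.toList).drop 1 = [] := by
        simp [List.drop_eq_nil_of_le, h1.le]
      rw [h1, this]; simp [PySem.Chars.join, List.intercalate]

    · simp [h1]
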